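-- pv_equiv track=rewrite | github.com/nazarkorniychuk/JaneStreetAMP | CS/Warm-Up/Python Warm-Up [CS2-CS3]/code/dinner.py | invite_to_dinner_slow
-- ===== SOURCE A (Python) =====
-- def filter_bad_invites(all_subsets:list, friends:dict)->list[list[str]]:
--     '''Removes subsets from all_subsets that contain any pair of friends who
--        are in a dislike relationship
--
--        Args:
--            all_subsets: a list of all possible friend combinations, each reresented as a list of strings
--            friends: dictionary-based adjacency matrix representing friend relations
--
--        Returns:
--            A list containing only friend combinations that exclude dislike pairs
--
--        Example
--        -------
--        >>> all_subsets = [[], ['Eve'], ['Bob'], ['Bob', 'Eve'], ['Alice'], ['Alice', 'Eve'], ['Alice', 'Bob'], ['Alice', 'Bob', 'Eve']]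
--        >>> friends={'Alice':['Bob'],'Bob':['Alice'],'Eve':[]}
--        >>> filter_bad_invites(all_subsets, friends)
--        [[], ['Eve'], ['Bob'], ['Bob', 'Eve'], ['Alice'], ['Alice', 'Eve']]
--     '''
--     ### BEGIN SOLUTION
--     return_list = []
--     for i in all_subsets:
--         return_list.append(i.copy())
--
--     for i in all_subsets:
--         t = 0
--         for j in i:
--             for k in i:
--                 if k in friends[j]:
--                     return_list.remove(i)
--                     t += 1
--                     break
--             if t > 0:
--                 break
--
--     return return_list
--
-- def generate_all_subsets(friends: dict)->list[list[str]]: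
--     '''Converts each number from 0 to 2^n - 1 into binary and uses the binary representation
--        to determine the combination of guests and returns all possible combinations
--
--        Args:
--            friends: dictionary-based adjacency matrix representing friend relations
--
--        Returns:
--            A list of all possible subsets of friends to invite, represented as lists of strings
--
--        Example
--        -------
--        >>> friends={'Alice':['Bob'],'Bob':['Alice', 'Eve'],'Eve':['Bob']}
--        >>> generate_all_subsets(friends)
--        [[], ['Eve'], ['Bob'], ['Bob', 'Eve'], ['Alice'], ['Alice', 'Eve'], ['Alice', 'Bob'], ['Alice', 'Bob', 'Eve']]
--     '''
--     friend_list = list(friends.keys())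
--     n = len(friends)
--
--     all_subsets = []
--
--     for i in range(2**n):
--         num = i  #convert each number in the range to a binary string
--         new_subset = []
--         for j in range(n): # to_binary_division approach
--             if (num % 2 == 1): # 1 indicates the guest is included
--                 new_subset = [friend_list[n-1-j]] + new_subset
--             num = num // 2
--         all_subsets.append(new_subset)
--
--     return all_subsets
--
-- def invite_to_dinner_slow(friends: dict)-> list[str]:
--     '''Finds the invite combo with the maximum number of guests via the exhaustive approach:
--             1. Generate every possible combination of guests
--             2. Filter out the combinations that include dislike relationships
--             3. Find the combination which give you the maximum number of invites
--
--        Args: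
--            friends: dictionary-based adjacency matrix representing friend relations
--
--        Returns:
--            A list of friends to invite to dinner which maximizes the number of friends on the list
--
--        Example
--        -------
--        >>> riends={'Alice':['Bob'],'Bob':['Alice', 'Eve'],'Cleo':[],'Don':[],'Eve':['Bob']}
--        >>> invite_to_dinner_slow(friends)
--        ['Alice', 'Cleo', 'Don', 'Eve']
--     '''
--     all_subsets = generate_all_subsets(friends)
--     only_good_subsets = filter_bad_invites(all_subsets, friends)
--
--     #find the subset which maximizes number of invites
--     invite_list = []
--     for i in only_good_subsets:
--         if len(i) > len(invite_list):
--             invite_list = i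
--
--     return invite_list
-- ===== SOURCE B (Python) =====
-- def invite_to_dinner_slow(friends: dict) -> list[str]:
--     '''Depth-first branch-and-prune over the friend keys (exclude-first, then
--        include when compatible with everyone already chosen), keeping the
--        first strictly-longest complete guest list.'''
--     keys = list(friends)
--     best = []
--
--     def compatible(k, cur):
--         if k in friends[k]:
--             return False
--         for m in cur:
--             if k in friends[m] or m in friends[k]:
--                 return False
--         return True
--
--     def rec(i, cur):
--         nonlocal best
--         if i == len(keys):
--             if len(cur) > len(best):
--                 best = cur
--             return
--         rec(i + 1, cur)            # exclude keys[i] first (matches A's bitmask order)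
--         k = keys[i]
--         if compatible(k, cur):
--             rec(i + 1, cur + [k])  # include keys[i]
--
--     rec(0, [])
--     return best
-- ===== Notes on version B (the rewrite author's own statement) =====
-- stated objective: alternative
-- what changed: Replaced A's three-phase pipeline (materialise all 2^n subsets via binary counting, delete bad ones with repeated list.remove, rescan for the longest) by a single depth-first recursion over the keys that carries the current subset and the incumbent best, checking each candidate only against already-chosen members so invalid branches are pruned before expansion; enumeration order (exclude-before-include, first key outermost) and the strict-improvement tie-break match A exactly.
import Mathlib
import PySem

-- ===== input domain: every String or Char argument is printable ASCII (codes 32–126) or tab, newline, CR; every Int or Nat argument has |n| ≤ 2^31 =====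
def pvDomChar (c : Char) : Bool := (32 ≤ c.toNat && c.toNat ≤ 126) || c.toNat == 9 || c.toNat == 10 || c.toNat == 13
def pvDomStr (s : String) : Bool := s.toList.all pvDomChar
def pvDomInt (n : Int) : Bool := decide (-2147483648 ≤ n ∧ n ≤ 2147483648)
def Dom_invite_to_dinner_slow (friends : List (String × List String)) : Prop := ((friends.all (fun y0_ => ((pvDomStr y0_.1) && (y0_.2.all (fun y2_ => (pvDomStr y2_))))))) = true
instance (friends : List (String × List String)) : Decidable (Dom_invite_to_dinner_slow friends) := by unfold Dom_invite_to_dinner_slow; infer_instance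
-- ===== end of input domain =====

-- B replaces A's generate-all-2^n-subsets / remove-bad / rescan pipeline by one pruned
-- depth-first recursion over the keys carrying the current subset and the incumbent best.

-- ===== PORT A =====
-- generate_all_subsets: for i in range(2**n), peel bits of i (LSB first), prepending friend_list[n-1-j]
def pvGenerateAllSubsets (friends : List (String × List String)) : List (List String) :=
  let friend_list := (PySem.Dict.mk friends).keys
  let n : Nat := friend_list.length
  (PySem.List.pyRange 0 ((2 ^ n : Nat) : Int) 1).foldl (fun all_subsets i =>
    let st := (PySem.List.pyRange 0 (n : Int) 1).foldl
      (fun (st : Int × List String) j =>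
        (PySem.Int.floordiv st.1 2,
         if PySem.Int.mod st.1 2 == 1 then
           ((PySem.List.pyGet? friend_list ((n : Int) - 1 - j)).getD "") :: st.2
         else st.2))
      (i, [])
    all_subsets ++ [st.2]) []

-- the j/k loops with the t counter and the two breaks: subset i is removed (first equal
-- occurrence, once) exactly when the first ordered pair (j, k) in i with k in friends[j] is hit
def pvBad (friends : List (String × List String)) (i : List String) : Bool :=
  i.any (fun j => i.any (fun k => (PySem.Dict.getD (PySem.Dict.mk friends) j []).contains k))

def pvFilterBadInvites (all_subsets : List (List String)) (friends : List (String × List String)) : List (List String) :=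
  -- first loop: return_list.append(i.copy())  (i.copy() of an immutable list is i)
  let return_list := all_subsets.foldl (fun rl i => rl ++ [i]) []
  all_subsets.foldl (fun rl i => if pvBad friends i then rl.erase i else rl) return_list

def invite_to_dinner_slow (friends : List (String × List String)) : List String :=
  let all_subsets := pvGenerateAllSubsets friends
  let only_good_subsets := pvFilterBadInvites all_subsets friends
  only_good_subsets.foldl (fun invite_list i => if i.length > invite_list.length then i else invite_list) []

-- ===== PORT B =====
-- compatible(k, cur): no self-dislike and no dislike in either direction with a chosen member
def pvCompatible (friends : List (String × List String)) (k : String) (cur : List String) : Bool :=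
  if (PySem.Dict.getD (PySem.Dict.mk friends) k []).contains k then false
  else cur.all (fun m =>
    !((PySem.Dict.getD (PySem.Dict.mk friends) m []).contains k)
    && !((PySem.Dict.getD (PySem.Dict.mk friends) k []).contains m))

-- rec(i, cur): exclude keys[i] first, then include it when compatible; at a leaf keep cur
-- only when strictly longer than the incumbent
def pvRec (friends : List (String × List String)) : List String → List String → List String → List String
  | [], cur, best => if cur.length > best.length then cur else best
  | k :: ks, cur, best =>
    let best' := pvRec friends ks cur best
    if pvCompatible friends k cur then pvRec friends ks (cur ++ [k]) best' else best'

def invite_to_dinner_slow_alt (friends : List (String × List String)) : List String :=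
  pvRec friends (PySem.Dict.mk friends).keys [] []

-- ===== PRECONDITION & SPEC =====
def Spec_invite_to_dinner_slow (friends : List (String × List String)) (out : List String) : Prop := out = invite_to_dinner_slow_alt friends
instance (friends : List (String × List String)) (out : List String) : Decidable (Spec_invite_to_dinner_slow friends out) := by unfold Spec_invite_to_dinner_slow; infer_instance

-- ===== CLAIM (what is proved, stated in full; the proofs are below) =====
def Claim_equal_invite_to_dinner_slow : Prop := ∀ (friends : List (String × List String)), Dom_invite_to_dinner_slow friends → Spec_invite_to_dinner_slow friends (invite_to_dinner_slow friends)

-- ===== LEMMAS AND PROOFS =====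

-- subsets of keys in A's bitmask order: mask 0..2^n-1, first key = most significant bit
def pvS : List String → List (List String)
  | [] => [[]]
  | k :: ks => pvS ks ++ (pvS ks).map (k :: ·)

-- the subset encoded by mask i (bit |ks|-1-position selects)
def pvSel : List String → Int → List String
  | [], _ => []
  | k :: ks, i =>
    if PySem.Int.mod (PySem.Int.floordiv i ((2 ^ ks.length : Nat) : Int)) 2 == 1
    then k :: pvSel ks i else pvSel ks i

lemma pvSel_shift (ks : List String) : ∀ (q r : Int),
    pvSel ks (((2 ^ ks.length : Nat) : Int) * q + r) = pvSel ks r := by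
  induction ks with
  | nil => intro q r; rfl
  | cons k ks ih =>
    intro q r
    have h2m : (0:Int) < ((2 ^ ks.length : Nat) : Int) := by positivity
    have hrw : ((2 ^ (k :: ks).length : Nat) : Int) * q + r
        = r + ((2 ^ ks.length : Nat) : Int) * (2 * q) := by
      simp [List.length_cons, pow_succ]; ring
    have hdiv : PySem.Int.floordiv (((2 ^ (k :: ks).length : Nat) : Int) * q + r) ((2 ^ ks.length : Nat) : Int)
        = PySem.Int.floordiv r ((2 ^ ks.length : Nat) : Int) + 2 * q := by
      rw [hrw, PySem.Int.floordiv_eq_ediv_of_pos h2m, PySem.Int.floordiv_eq_ediv_of_pos h2m,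
        Int.add_mul_ediv_left _ _ (by omega : ((2 ^ ks.length : Nat) : Int) ≠ 0)]
    have hmod : PySem.Int.mod (PySem.Int.floordiv r ((2 ^ ks.length : Nat) : Int) + 2 * q) 2
        = PySem.Int.mod (PySem.Int.floordiv r ((2 ^ ks.length : Nat) : Int)) 2 := by
      rw [PySem.Int.mod_eq_emod_of_pos (by omega), PySem.Int.mod_eq_emod_of_pos (by omega)]
      omega
    have htail : pvSel ks (((2 ^ (k :: ks).length : Nat) : Int) * q + r) = pvSel ks r := by
      rw [hrw, add_comm r]; exact ih (2 * q) r
    simp only [pvSel, hdiv, hmod, htail]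

lemma pvSel_of_lt (ks : List String) (k : String) (r : Int) (h0 : 0 ≤ r)
    (h : r < ((2 ^ ks.length : Nat) : Int)) :
    pvSel (k :: ks) r = pvSel ks r := by
  have h1 : PySem.Int.floordiv r ((2 ^ ks.length : Nat) : Int) = 0 := by
    rw [PySem.Int.floordiv_eq_ediv_of_pos (by positivity)]
    exact Int.ediv_eq_zero_of_lt h0 h
  simp only [pvSel]
  rw [h1]
  rfl

lemma pvSel_of_hi (ks : List String) (k : String) (r : Int) (h0 : 0 ≤ r)
    (h : r < ((2 ^ ks.length : Nat) : Int)) :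
    pvSel (k :: ks) (((2 ^ ks.length : Nat) : Int) + r) = k :: pvSel ks r := by
  have hd : PySem.Int.floordiv (((2 ^ ks.length : Nat) : Int) + r) ((2 ^ ks.length : Nat) : Int) = 1 := by
    rw [PySem.Int.floordiv_eq_ediv_of_pos (by positivity)]
    have h1 : (((2 ^ ks.length : Nat) : Int) + r) = r + ((2 ^ ks.length : Nat) : Int) * 1 := by ring
    have h2 : ((2 ^ ks.length : Nat) : Int) ≠ 0 := by positivity
    rw [h1, Int.add_mul_ediv_left r 1 h2, Int.ediv_eq_zero_of_lt h0 h]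
    norm_num
  have hs : pvSel ks (((2 ^ ks.length : Nat) : Int) + r) = pvSel ks r := by
    have := pvSel_shift ks 1 r; rw [mul_one] at this; exact this
  simp only [pvSel]
  rw [hd, hs]
  rfl

-- the inner bit-peeling loop computes pvSel
lemma pvInner (keys : List String) : ∀ (i : Int) (sub : List String),
    (PySem.List.pyRange 0 (keys.length : Int) 1).foldl
      (fun (st : Int × List String) j =>
        (PySem.Int.floordiv st.1 2,
         if PySem.Int.mod st.1 2 == 1 then
           ((PySem.List.pyGet? keys ((keys.length : Int) - 1 - j)).getD "") :: st.2
         else st.2))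
      (i, sub)
    = (PySem.Int.floordiv i ((2 ^ keys.length : Nat) : Int), pvSel keys i ++ sub) := by
  induction keys with
  | nil =>
    intro i sub
    rw [show ((List.length ([] : List String) : Int)) = 0 from rfl, PySem.List.pyRange_one_eq_nil le_rfl]
    simp [pvSel]
  | cons k ks ih =>
    intro i sub
    have hlen : (((k :: ks).length : Nat) : Int) = (ks.length : Int) + 1 := by
      simp
    rw [hlen, PySem.List.pyRange_one_succ_right (Int.natCast_nonneg _), List.foldl_append]
    have hinner : List.foldl
        (fun (st : Int × List String) j =>
          (PySem.Int.floordiv st.1 2,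
           if PySem.Int.mod st.1 2 == 1 then
             ((PySem.List.pyGet? (k :: ks) ((ks.length : Int) + 1 - 1 - j)).getD "") :: st.2
           else st.2))
        (i, sub) (PySem.List.pyRange 0 (ks.length : Int) 1)
        = (PySem.Int.floordiv i ((2 ^ ks.length : Nat) : Int), pvSel ks i ++ sub) := by
      rw [PySem.List.foldl_congr_mem _ _
        (fun (st : Int × List String) j =>
          (PySem.Int.floordiv st.1 2,
           if PySem.Int.mod st.1 2 == 1 then
             ((PySem.List.pyGet? ks ((ks.length : Int) - 1 - j)).getD "") :: st.2
           else st.2)) _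
        (by
          intro st j hj
          rw [PySem.List.mem_pyRange_one] at hj
          have h1 : PySem.List.pyGet? (k :: ks) ((ks.length : Int) + 1 - 1 - j)
              = PySem.List.pyGet? ks ((ks.length : Int) - 1 - j) := by
            rw [PySem.List.pyGet?_of_nonneg _ (by omega), PySem.List.pyGet?_of_nonneg _ (by omega)]
            have h2 : ((ks.length : Int) + 1 - 1 - j).toNat = ((ks.length : Int) - 1 - j).toNat + 1 := by
              omega
            rw [h2, List.getElem?_cons_succ]
          rw [h1])]
      exact ih i sub
    rw [hinner]
    simp only [List.foldl_cons, List.foldl_nil]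
    have hidx : PySem.List.pyGet? (k :: ks) ((ks.length : Int) + 1 - 1 - (ks.length : Int)) = some k := by
      rw [show ((ks.length : Int) + 1 - 1 - (ks.length : Int)) = 0 by ring, PySem.List.pyGet?_zero_cons]
    have h2m : (0:Int) < ((2 ^ ks.length : Nat) : Int) := by positivity
    have hfst : PySem.Int.floordiv (PySem.Int.floordiv i ((2 ^ ks.length : Nat) : Int)) 2
        = PySem.Int.floordiv i ((2 ^ (k :: ks).length : Nat) : Int) := by
      rw [PySem.Int.floordiv_eq_ediv_of_pos h2m, PySem.Int.floordiv_eq_ediv_of_pos (by omega : (0:Int) < 2),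
        PySem.Int.floordiv_eq_ediv_of_pos (by positivity),
        Int.ediv_ediv_of_nonneg (le_of_lt h2m)]
      congr 1
    rw [hidx]
    simp only [Option.getD_some, hfst]
    have hsnd : (if PySem.Int.mod (PySem.Int.floordiv i ((2 ^ ks.length : Nat) : Int)) 2 == 1
          then k :: (pvSel ks i ++ sub) else pvSel ks i ++ sub)
        = pvSel (k :: ks) i ++ sub := by
      simp only [pvSel]
      by_cases hb : (PySem.Int.mod (PySem.Int.floordiv i ((2 ^ ks.length : Nat) : Int)) 2 == 1) = true
      · rw [if_pos hb, if_pos hb]; rfl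
      · rw [if_neg hb, if_neg hb]
    rw [← hsnd]

-- A's generator produces exactly the masked subsets, in mask order
lemma pvGenerate_eq (friends : List (String × List String)) :
    pvGenerateAllSubsets friends
    = (PySem.List.pyRange 0 ((2 ^ (PySem.Dict.mk friends).keys.length : Nat) : Int) 1).map
        (fun i => pvSel (PySem.Dict.mk friends).keys i) := by
  unfold pvGenerateAllSubsets
  rw [PySem.List.foldl_append_singleton_eq_map]
  simp only [List.nil_append]
  exact List.map_congr_left (fun i _ => by rw [pvInner]; simp)


lemma pvMapRange (ks : List String) :
    (PySem.List.pyRange 0 ((2 ^ ks.length : Nat) : Int) 1).map (pvSel ks) = pvS ks := by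
  rw [PySem.List.pyRange_zero_nat, List.map_map]
  induction ks with
  | nil => rfl
  | cons k ks ih =>
    have hlen : (2 : Nat) ^ (k :: ks).length = 2 ^ ks.length + 2 ^ ks.length := by
      simp [List.length_cons, pow_succ]; ring
    rw [hlen, List.range_add, List.map_append, List.map_map]
    congr 1
    · rw [← ih]
      apply List.map_congr_left
      intro n hn
      rw [List.mem_range] at hn
      exact pvSel_of_lt ks k (n : Int) (by positivity) (by exact_mod_cast hn)
    · rw [← ih, List.map_map]
      apply List.map_congr_left
      intro n hn
      rw [List.mem_range] at hn
      simp only [Function.comp]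
      rw [Nat.cast_add]
      exact pvSel_of_hi ks k (n : Int) (by positivity) (by exact_mod_cast hn)

-- the remove loop keeps exactly the good subsets, in order
lemma pvEraseLoop (friends : List (String × List String)) :
    ∀ (L pre : List (List String)), (∀ x ∈ pre, pvBad friends x = false) →
    L.foldl (fun rl i => if pvBad friends i then rl.erase i else rl) (pre ++ L)
    = pre ++ L.filter (fun x => !pvBad friends x) := by
  intro L
  induction L with
  | nil => intro pre _; simp
  | cons i L ih =>
    intro pre hpre
    rw [List.foldl_cons]
    by_cases hb : pvBad friends i = true
    · have hni : i ∉ pre := fun hmem => by simp [hpre i hmem] at hb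
      have he : (pre ++ i :: L).erase i = pre ++ L := by
        rw [List.erase_append_right _ hni, List.erase_cons_head]
      rw [if_pos hb, he, ih pre hpre]
      simp [hb]
    · have hg : pvBad friends i = false := by simpa using hb
      have hext : ∀ x ∈ pre ++ [i], pvBad friends x = false := by
        intro x hx
        rcases List.mem_append.1 hx with hmem | hmem
        · exact hpre x hmem
        · simp at hmem; subst hmem; exact hg
      have hrw : pre ++ i :: L = (pre ++ [i]) ++ L := by simp
      rw [if_neg hb, hrw, ih (pre ++ [i]) hext]
      simp [hg]

lemma pvBad_append (friends : List (String × List String)) (cur : List String) (k : String) :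
    pvBad friends (cur ++ [k]) = (pvBad friends cur || !pvCompatible friends k cur) := by
  have hL : pvBad friends (cur ++ [k]) = true ↔
      (∃ j ∈ cur, ∃ x ∈ cur, (PySem.Dict.getD (PySem.Dict.mk friends) j []).contains x = true)
      ∨ (∃ m ∈ cur, (PySem.Dict.getD (PySem.Dict.mk friends) m []).contains k = true)
      ∨ (∃ m ∈ cur, (PySem.Dict.getD (PySem.Dict.mk friends) k []).contains m = true)
      ∨ (PySem.Dict.getD (PySem.Dict.mk friends) k []).contains k = true := by
    simp only [pvBad, List.any_eq_true, List.mem_append, List.mem_singleton]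
    constructor
    · rintro ⟨j, hj | rfl, x, hx | rfl, hc⟩
      · exact Or.inl ⟨j, hj, x, hx, hc⟩
      · exact Or.inr (Or.inl ⟨j, hj, hc⟩)
      · exact Or.inr (Or.inr (Or.inl ⟨x, hx, hc⟩))
      · exact Or.inr (Or.inr (Or.inr hc))
    · rintro (⟨j, hj, x, hx, hc⟩ | ⟨m, hm, hc⟩ | ⟨m, hm, hc⟩ | hc)
      · exact ⟨j, Or.inl hj, x, Or.inl hx, hc⟩
      · exact ⟨m, Or.inl hm, k, Or.inr rfl, hc⟩
      · exact ⟨k, Or.inr rfl, m, Or.inl hm, hc⟩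
      · exact ⟨k, Or.inr rfl, k, Or.inr rfl, hc⟩
  have hcur : pvBad friends cur = true ↔
      (∃ j ∈ cur, ∃ x ∈ cur, (PySem.Dict.getD (PySem.Dict.mk friends) j []).contains x = true) := by
    simp [pvBad, List.any_eq_true]
  have hC : pvCompatible friends k cur = false ↔
      ((PySem.Dict.getD (PySem.Dict.mk friends) k []).contains k = true
       ∨ ∃ m ∈ cur, (PySem.Dict.getD (PySem.Dict.mk friends) m []).contains k = true
                    ∨ (PySem.Dict.getD (PySem.Dict.mk friends) k []).contains m = true) := by
    by_cases hself : (PySem.Dict.getD (PySem.Dict.mk friends) k []).contains k = true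
    · constructor
      · intro _; exact Or.inl hself
      · intro _; unfold pvCompatible; rw [if_pos hself]
    · unfold pvCompatible
      rw [if_neg hself]
      simp only [List.all_eq_false]
      have hbool : ∀ (a b : Bool), (¬ (!a && !b) = true) ↔ (a = true ∨ b = true) := by decide
      constructor
      · rintro ⟨m, hm, hc⟩
        exact Or.inr ⟨m, hm, (hbool _ _).mp hc⟩
      · rintro (hk | ⟨m, hm, hc⟩)
        · exact absurd hk hself
        · exact ⟨m, hm, (hbool _ _).mpr hc⟩
  apply Bool.eq_iff_iff.mpr
  rw [hL]
  constructor
  · rintro (h | h | h | h)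
    · simp [hcur.mpr h]
    · simp only [Bool.or_eq_true, Bool.not_eq_true']
      exact Or.inr (hC.mpr (Or.inr (by obtain ⟨m, hm, hc⟩ := h; exact ⟨m, hm, Or.inl hc⟩)))
    · simp only [Bool.or_eq_true, Bool.not_eq_true']
      exact Or.inr (hC.mpr (Or.inr (by obtain ⟨m, hm, hc⟩ := h; exact ⟨m, hm, Or.inr hc⟩)))
    · simp only [Bool.or_eq_true, Bool.not_eq_true']
      exact Or.inr (hC.mpr (Or.inl h))
  · intro h
    simp only [Bool.or_eq_true, Bool.not_eq_true'] at h
    rcases h with hb | hnc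
    · exact Or.inl (hcur.mp hb)
    · rcases hC.mp (by simpa using hnc) with hself | ⟨m, hm, hc | hc⟩
      · exact Or.inr (Or.inr (Or.inr hself))
      · exact Or.inr (Or.inl ⟨m, hm, hc⟩)
      · exact Or.inr (Or.inr (Or.inl ⟨m, hm, hc⟩))

lemma pvBad_mono (friends : List (String × List String)) (x s : List String)
    (h : pvBad friends x = true) : pvBad friends (x ++ s) = true := by
  simp only [pvBad, List.any_eq_true] at h ⊢
  obtain ⟨j, hj, k, hk, hc⟩ := h
  exact ⟨j, List.mem_append.2 (Or.inl hj), k, List.mem_append.2 (Or.inl hk), hc⟩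

-- the pruned recursion folds the incumbent over exactly the good completions, in order
lemma pvRec_char (friends : List (String × List String)) :
    ∀ (ks cur best : List String), pvBad friends cur = false →
    pvRec friends ks cur best
    = (((pvS ks).map (cur ++ ·)).filter (fun x => !pvBad friends x)).foldl
        (fun invite_list i => if i.length > invite_list.length then i else invite_list) best := by
  intro ks
  induction ks with
  | nil => intro cur best h; simp [pvRec, pvS, h]
  | cons k ks ih =>
    intro cur best h
    have hsplit : ((pvS (k :: ks)).map (cur ++ ·)).filter (fun x => !pvBad friends x)
        = ((pvS ks).map (cur ++ ·)).filter (fun x => !pvBad friends x)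
          ++ ((pvS ks).map ((cur ++ [k]) ++ ·)).filter (fun x => !pvBad friends x) := by
      simp only [pvS, List.map_append, List.filter_append, List.map_map]
      congr 2
      exact List.map_congr_left (fun s _ => by simp [Function.comp])
    rw [hsplit, List.foldl_append]
    simp only [pvRec]
    rw [← ih cur best h]
    by_cases hc : pvCompatible friends k cur = true
    · have hgood : pvBad friends (cur ++ [k]) = false := by
        rw [pvBad_append, h, hc]; rfl
      rw [if_pos hc, ih (cur ++ [k]) _ hgood]
    · have hbad : pvBad friends (cur ++ [k]) = true := by
        have hc' : pvCompatible friends k cur = false := by simpa using hc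
        rw [pvBad_append, h, hc']; rfl
      have hempty : ((pvS ks).map ((cur ++ [k]) ++ ·)).filter (fun x => !pvBad friends x) = [] := by
        apply List.filter_eq_nil_iff.2
        intro x hx
        obtain ⟨s, _, rfl⟩ := List.mem_map.1 hx
        have := pvBad_mono friends (cur ++ [k]) s hbad
        simpa using this
      rw [if_neg hc, hempty]
      simp

-- ===== VERDICT (by name: the statement is the Claim_ definition above) =====
theorem invite_to_dinner_slow_spec : Claim_equal_invite_to_dinner_slow := by
  intro friends _
  unfold Spec_invite_to_dinner_slow
  simp only [invite_to_dinner_slow, invite_to_dinner_slow_alt, pvFilterBadInvites]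
  rw [pvGenerate_eq, pvMapRange, PySem.List.foldl_append_singleton_eq_self, List.nil_append]
  have he := pvEraseLoop friends (pvS (PySem.Dict.mk friends).keys) [] (by intro x hx; simp at hx)
  rw [List.nil_append] at he
  rw [he, pvRec_char friends (PySem.Dict.mk friends).keys [] [] (by rfl)]
  simp
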